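-- pv_equiv track=rewrite | github.com/chaiboo/prosperity | dashboard.py | get_channel_color_map
-- ===== SOURCE A (Python) =====
-- PROSPERITY_COLORS = ["#3A0CA3", "#7209B7", "#CDB4DB"]  # eggplant, medium violet, soft lilac
--
-- CONTROL_COLORS = ["#1B4332", "#2D6A4F", "#95D5B2"]     # forest, emerald, mint
--
-- PROSPERITY_CHANNELS = {"joel_osteen", "elevation", "creflo"}
--
-- def get_channel_color_map(slugs):
--     """Map each slug to its color. Prosperity = Group A, Control = Group B."""
--     color_map = {}
--     p_idx, c_idx = 0, 0
--     for s in sorted(slugs):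
--         if s in PROSPERITY_CHANNELS:
--             color_map[s] = PROSPERITY_COLORS[p_idx % len(PROSPERITY_COLORS)]
--             p_idx += 1
--         else:
--             color_map[s] = CONTROL_COLORS[c_idx % len(CONTROL_COLORS)]
--             c_idx += 1
--     return color_map
-- ===== SOURCE B (Python) =====
-- PROSPERITY_COLORS = ["#3A0CA3", "#7209B7", "#CDB4DB"]
--
-- CONTROL_COLORS = ["#1B4332", "#2D6A4F", "#95D5B2"]
--
-- PROSPERITY_CHANNELS = {"joel_osteen", "elevation", "creflo"}
--
-- def get_channel_color_map(slugs):
--     """Map each slug to its color. Prosperity = Group A, Control = Group B."""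
--     ss = sorted(slugs)
--     pros = [s for s in ss if s in PROSPERITY_CHANNELS]
--     ctrl = [s for s in ss if s not in PROSPERITY_CHANNELS]
--     merged = {s: PROSPERITY_COLORS[i % len(PROSPERITY_COLORS)] for i, s in enumerate(pros)}
--     merged.update({s: CONTROL_COLORS[i % len(CONTROL_COLORS)] for i, s in enumerate(ctrl)})
--     return {s: merged[s] for s in ss}
-- ===== Notes on version B (the rewrite author's own statement) =====
-- stated objective: alternative
-- what changed: Replaces A's single interleaved loop with two running counters by partitioning the sorted list into the prosperity and control groups, building each group's color assignment with its own enumerate-based dict comprehension, merging them, and rebuilding the map in sorted order.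
import Mathlib
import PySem

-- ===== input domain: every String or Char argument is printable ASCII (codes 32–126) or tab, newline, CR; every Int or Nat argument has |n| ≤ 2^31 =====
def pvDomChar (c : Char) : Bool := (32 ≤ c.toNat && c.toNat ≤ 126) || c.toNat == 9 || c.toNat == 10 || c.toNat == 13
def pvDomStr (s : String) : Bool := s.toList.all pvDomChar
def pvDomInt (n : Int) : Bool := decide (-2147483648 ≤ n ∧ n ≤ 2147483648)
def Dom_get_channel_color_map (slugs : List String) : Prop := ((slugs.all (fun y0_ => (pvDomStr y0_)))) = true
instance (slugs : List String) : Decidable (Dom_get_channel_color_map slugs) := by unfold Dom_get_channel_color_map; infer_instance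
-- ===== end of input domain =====

-- B replaces A's interleaved two-counter loop by a partition of the sorted list into the two
-- groups followed by two per-group enumerate comprehensions and a rebuild (objective: alternative
-- decomposition, same cost).

-- ===== PORT A =====
def PROSPERITY_COLORS : List String := ["#3A0CA3", "#7209B7", "#CDB4DB"]

def CONTROL_COLORS : List String := ["#1B4332", "#2D6A4F", "#95D5B2"]

def PROSPERITY_CHANNELS : PySem.Set String := PySem.Set.ofList ["joel_osteen", "elevation", "creflo"]

-- PROSPERITY_COLORS[p % len(...)] : the index is mod len, always in range, so pyGetD is exact here
def get_channel_color_map (slugs : List String) : List (String × String) :=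
  ((PySem.List.sorted slugs (fun s => s) false).foldl
    (fun (st : PySem.Dict String String × Int × Int) s =>
      if PySem.Set.contains PROSPERITY_CHANNELS s then
        (st.1.insert s (PySem.List.pyGetD PROSPERITY_COLORS
            (PySem.Int.mod st.2.1 (PROSPERITY_COLORS.length : Int)) ""),
         st.2.1 + 1, st.2.2)
      else
        (st.1.insert s (PySem.List.pyGetD CONTROL_COLORS
            (PySem.Int.mod st.2.2 (CONTROL_COLORS.length : Int)) ""),
         st.2.1, st.2.2 + 1))
    (PySem.Dict.empty, 0, 0)).1.items

-- ===== PORT B =====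
def get_channel_color_map_alt (slugs : List String) : List (String × String) :=
  let ss := PySem.List.sorted slugs (fun s => s) false
  let pros := ss.filter (fun s => PySem.Set.contains PROSPERITY_CHANNELS s)
  let ctrl := ss.filter (fun s => !PySem.Set.contains PROSPERITY_CHANNELS s)
  let m1 : PySem.Dict String String :=
    (PySem.List.enumerate pros).foldl
      (fun d e => d.insert e.2 (PySem.List.pyGetD PROSPERITY_COLORS
          (PySem.Int.mod e.1 (PROSPERITY_COLORS.length : Int)) "")) PySem.Dict.empty
  let m2 : PySem.Dict String String :=
    (PySem.List.enumerate ctrl).foldl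
      (fun d e => d.insert e.2 (PySem.List.pyGetD CONTROL_COLORS
          (PySem.Int.mod e.1 (CONTROL_COLORS.length : Int)) "")) PySem.Dict.empty
  let merged := m1.update m2.items
  -- merged[s]: every s of ss is a key of merged, so Python's KeyError branch is unreachable; getD is exact here
  (ss.foldl (fun d s => d.insert s (merged.getD s "")) PySem.Dict.empty).items

-- ===== PRECONDITION & SPEC =====
def Spec_get_channel_color_map (slugs : List String) (out : List (String × String)) : Prop := out = get_channel_color_map_alt slugs
instance (slugs : List String) (out : List (String × String)) : Decidable (Spec_get_channel_color_map slugs out) := by unfold Spec_get_channel_color_map; infer_instance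

-- ===== CLAIM (what is proved, stated in full; the proofs are below) =====
def Claim_equal_get_channel_color_map : Prop := ∀ (slugs : List String), Dom_get_channel_color_map slugs → Spec_get_channel_color_map slugs (get_channel_color_map slugs)

-- ===== LEMMAS AND PROOFS =====

-- abbreviations for the proof
def prosF (s : String) : Bool := PySem.Set.contains PROSPERITY_CHANNELS s

def valP (i : Int) : String :=
  PySem.List.pyGetD PROSPERITY_COLORS (PySem.Int.mod i (PROSPERITY_COLORS.length : Int)) ""

def valC (i : Int) : String :=
  PySem.List.pyGetD CONTROL_COLORS (PySem.Int.mod i (CONTROL_COLORS.length : Int)) ""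

-- the per-occurrence (key, colour) pairs A's loop inserts, with starting counters p and c
def annot : List String → Int → Int → List (String × String)
  | [], _, _ => []
  | s :: t, p, c =>
    if prosF s then (s, valP p) :: annot t (p + 1) c
    else (s, valC c) :: annot t p (c + 1)

def buildD (ps : List (String × String)) (d : PySem.Dict String String) : PySem.Dict String String :=
  ps.foldl (fun acc pr => acc.insert pr.1 pr.2) d

-- value of the LAST pair with key k (Python dict: later assignment wins)
def lastVal? (ps : List (String × String)) (k : String) : Option String :=
  (ps.reverse.find? (fun pr => pr.1 == k)).map (·.2)

def pairsP (fl : List String) : List (String × String) :=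
  (PySem.List.enumerate fl).map (fun e => (e.2, valP e.1))

def pairsC (fl : List String) : List (String × String) :=
  (PySem.List.enumerate fl).map (fun e => (e.2, valC e.1))

lemma annot_map_fst (l : List String) (p c : Int) : (annot l p c).map (·.1) = l := by
  induction l generalizing p c with
  | nil => rfl
  | cons a t ih =>
    by_cases h : prosF a <;> simp [annot, h, ih]

lemma lastVal?_cons (a : String × String) (ps : List (String × String)) (k : String) :
    lastVal? (a :: ps) k = (lastVal? ps k).or (if a.1 == k then some a.2 else none) := by
  simp only [lastVal?, List.reverse_cons, List.find?_append]
  cases h : ps.reverse.find? (fun pr => pr.1 == k) with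
  | some v => simp
  | none => cases hk : (a.1 == k) <;> simp [List.find?, hk]

lemma foldA_eq (l : List String) (d : PySem.Dict String String) (p c : Int) :
    (l.foldl
      (fun (st : PySem.Dict String String × Int × Int) s =>
        if PySem.Set.contains PROSPERITY_CHANNELS s then
          (st.1.insert s (PySem.List.pyGetD PROSPERITY_COLORS
              (PySem.Int.mod st.2.1 (PROSPERITY_COLORS.length : Int)) ""),
           st.2.1 + 1, st.2.2)
        else
          (st.1.insert s (PySem.List.pyGetD CONTROL_COLORS
              (PySem.Int.mod st.2.2 (CONTROL_COLORS.length : Int)) ""),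
           st.2.1, st.2.2 + 1))
      (d, p, c)).1 = buildD (annot l p c) d := by
  induction l generalizing d p c with
  | nil => rfl
  | cons a t ih =>
    by_cases h : prosF a
    · simp only [List.foldl_cons, annot, h, if_pos (show PySem.Set.contains PROSPERITY_CHANNELS a = true from h)]
      simpa [buildD, valP] using ih (d.insert a (valP p)) (p + 1) c
    · simp only [List.foldl_cons, annot, h, if_neg (show ¬ PySem.Set.contains PROSPERITY_CHANNELS a = true from h)]
      simpa [buildD, valC] using ih (d.insert a (valC c)) p (c + 1)

lemma getD_buildD (ps : List (String × String)) (d : PySem.Dict String String)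
    (k : String) (dflt : String) :
    (buildD ps d).getD k dflt = (lastVal? ps k).getD (d.getD k dflt) := by
  induction ps generalizing d with
  | nil => simp [buildD, lastVal?]
  | cons a t ih =>
    rw [show buildD (a :: t) d = buildD t (d.insert a.1 a.2) from rfl, ih, lastVal?_cons]
    cases h : lastVal? t k with
    | some v => simp
    | none =>
      simp only [Option.none_or]
      by_cases hk : a.1 = k
      · simp [hk]
      · simp [hk, PySem.Dict.getD_insert, Ne.symm hk, beq_iff_eq]

lemma keys_buildD (ps : List (String × String)) (d : PySem.Dict String String) :
    (buildD ps d).keys = PySem.Set.update d.keys (ps.map (·.1)) :=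
  PySem.Dict.keys_foldl_insert_key ps (·.1) (fun _ pr => pr.2) d

lemma nodup_keys_buildD (ps : List (String × String)) (d : PySem.Dict String String)
    (h : d.keys.Nodup) : (buildD ps d).keys.Nodup :=
  PySem.Dict.nodup_keys_foldl_insert_key ps (·.1) (fun _ pr => pr.2) d h

-- the rebuild loop of B as a buildD over constant-per-key pairs
lemma foldg_eq (l : List String) (d : PySem.Dict String String) (g : String → String) :
    l.foldl (fun d s => d.insert s (g s)) d = buildD (l.map (fun s => (s, g s))) d := by
  simp [buildD, List.foldl_map]

lemma lastVal?_map_const (l : List String) (g : String → String) (k : String) :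
    lastVal? (l.map (fun s => (s, g s))) k = if k ∈ l then some (g k) else none := by
  induction l with
  | nil => simp [lastVal?]
  | cons a t ih =>
    rw [List.map_cons, lastVal?_cons, ih]
    by_cases ht : k ∈ t
    · simp [ht]
    · by_cases ha : a = k <;> simp [ht, ha, Ne.symm]

lemma find?_reverse_of_nodup (ps : List (String × String)) (k : String)
    (h : (ps.map (·.1)).Nodup) :
    ps.reverse.find? (fun pr => pr.1 == k) = ps.find? (fun pr => pr.1 == k) := by
  induction ps with
  | nil => rfl
  | cons a t ih =>
    rw [List.map_cons, List.nodup_cons] at h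
    rw [List.reverse_cons, List.find?_append, ih h.2]
    cases hk : (a.1 == k) with
    | true =>
      have hnone : t.find? (fun pr => pr.1 == k) = none := by
        rw [List.find?_eq_none]
        intro x hx hxk
        simp only [beq_iff_eq] at hk hxk
        exact h.1 (by rw [hk, ← hxk]; exact List.mem_map_of_mem hx)
      simp [hnone, List.find?, hk]
    | false => cases hfind : t.find? (fun pr => pr.1 == k) <;> simp [hfind, List.find?, hk]

-- last pair wins = first pair when the keys are Nodup
lemma lastVal?_eq_get? (d : PySem.Dict String String) (h : d.keys.Nodup) (k : String) :
    lastVal? d.items k = d.get? k := by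
  show (d.items.reverse.find? (fun pr => pr.1 == k)).map (·.2) =
    (d.items.find? (fun pr => pr.1 == k)).map (·.2)
  rw [find?_reverse_of_nodup d.items k h]

-- A's inserted pairs, restricted to a prosperity key, are B's pros comprehension pairs
lemma annot_lastVal_pros (l : List String) (p c : Int) (k : String) (hk : prosF k = true) :
    lastVal? (annot l p c) k =
      lastVal? ((PySem.List.enumerate (l.filter prosF) p).map (fun e => (e.2, valP e.1))) k := by
  induction l generalizing p c with
  | nil => rfl
  | cons a t ih =>
    by_cases h : prosF a
    · rw [show annot (a :: t) p c = (a, valP p) :: annot t (p + 1) c from by simp [annot, h],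
        List.filter_cons_of_pos h, PySem.List.enumerate_cons, List.map_cons,
        lastVal?_cons, lastVal?_cons, ih (p + 1) c]
    · have hak : (a == k) = false := by
        rw [beq_eq_false_iff_ne]
        intro e
        rw [e, hk] at h
        exact h rfl
      rw [show annot (a :: t) p c = (a, valC c) :: annot t p (c + 1) from by simp [annot, h],
        List.filter_cons_of_neg (by simpa using h), lastVal?_cons, ih p (c + 1)]
      simp [hak]

-- and restricted to a control key, they are B's control comprehension pairs
lemma annot_lastVal_ctrl (l : List String) (p c : Int) (k : String) (hk : prosF k = false) :
    lastVal? (annot l p c) k =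
      lastVal? ((PySem.List.enumerate (l.filter (fun s => !prosF s)) c).map (fun e => (e.2, valC e.1))) k := by
  induction l generalizing p c with
  | nil => rfl
  | cons a t ih =>
    by_cases h : prosF a
    · have hak : (a == k) = false := by
        rw [beq_eq_false_iff_ne]
        intro e
        rw [e, hk] at h
        exact Bool.noConfusion h
      rw [show annot (a :: t) p c = (a, valP p) :: annot t (p + 1) c from by simp [annot, h],
        List.filter_cons_of_neg (by simpa using h), lastVal?_cons, ih (p + 1) c]
      simp [hak]
    · rw [show annot (a :: t) p c = (a, valC c) :: annot t p (c + 1) from by simp [annot, h],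
        List.filter_cons_of_pos (by simpa using h), PySem.List.enumerate_cons, List.map_cons,
        lastVal?_cons, lastVal?_cons, ih p (c + 1)]

-- B's intermediate objects, as functions of the sorted list
def prosOf (ss : List String) : List String := ss.filter prosF
def ctrlOf (ss : List String) : List String := ss.filter (fun s => !prosF s)
def m1Of (ss : List String) : PySem.Dict String String := buildD (pairsP (prosOf ss)) PySem.Dict.empty
def m2Of (ss : List String) : PySem.Dict String String := buildD (pairsC (ctrlOf ss)) PySem.Dict.empty
def mergedOf (ss : List String) : PySem.Dict String String := buildD (m2Of ss).items (m1Of ss)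

lemma map_fst_pairsC (fl : List String) : (pairsC fl).map (·.1) = fl := by
  rw [pairsC, List.map_map]
  exact PySem.List.map_snd_enumerate fl 0

lemma keys_m2Of (ss : List String) : (m2Of ss).keys = PySem.Set.ofList (ctrlOf ss) := by
  rw [m2Of, keys_buildD, map_fst_pairsC]
  rfl

-- per-key agreement: A's final value for k is merged's value for k
lemma getD_agree (ss : List String) (k : String) (hk : k ∈ ss) :
    (buildD (annot ss 0 0) PySem.Dict.empty).getD k "" = (mergedOf ss).getD k "" := by
  have hnd2 : (m2Of ss).keys.Nodup := nodup_keys_buildD _ _ PySem.Dict.nodup_keys_empty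
  rw [getD_buildD, mergedOf, getD_buildD, lastVal?_eq_get? _ hnd2]
  cases hp : prosF k with
  | true =>
    have h2 : (m2Of ss).get? k = none := by
      rw [PySem.Dict.get?_eq_none_iff_not_mem_keys, keys_m2Of, PySem.Set.mem_ofList]
      intro hmem
      have := (List.mem_filter.mp hmem).2
      rw [hp] at this
      exact Bool.noConfusion this
    rw [h2, annot_lastVal_pros ss 0 0 k hp, Option.getD_none, m1Of, getD_buildD]
    rfl
  | false =>
    have hmem : k ∈ ctrlOf ss := List.mem_filter.mpr ⟨hk, by rw [hp]; rfl⟩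
    have h2 : (m2Of ss).get? k ≠ none := fun h =>
      ((PySem.Dict.get?_eq_none_iff_not_mem_keys _ _).mp h)
        (by rw [keys_m2Of]; exact (PySem.Set.mem_ofList _ _).mpr hmem)
    cases hg : (m2Of ss).get? k with
    | none => exact absurd hg h2
    | some w =>
      rw [annot_lastVal_ctrl ss 0 0 k hp]
      have : (m2Of ss).getD k "" = w := PySem.Dict.getD_of_get?_eq_some _ "" hg
      rw [← this, m2Of, getD_buildD]
      rfl

theorem main_eq (l : List String) :
    get_channel_color_map l = get_channel_color_map_alt l := by
  simp only [get_channel_color_map, get_channel_color_map_alt]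
  rw [foldA_eq]
  have hm1 : (PySem.List.enumerate (prosOf (PySem.List.sorted l (fun s => s) false))).foldl
      (fun d e => d.insert e.2 (PySem.List.pyGetD PROSPERITY_COLORS
          (PySem.Int.mod e.1 (PROSPERITY_COLORS.length : Int)) "")) PySem.Dict.empty
      = m1Of (PySem.List.sorted l (fun s => s) false) := by
    simp [m1Of, buildD, pairsP, List.foldl_map, valP]
  have hm2 : (PySem.List.enumerate (ctrlOf (PySem.List.sorted l (fun s => s) false))).foldl
      (fun d e => d.insert e.2 (PySem.List.pyGetD CONTROL_COLORS
          (PySem.Int.mod e.1 (CONTROL_COLORS.length : Int)) "")) PySem.Dict.empty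
      = m2Of (PySem.List.sorted l (fun s => s) false) := by
    simp [m2Of, buildD, pairsC, List.foldl_map, valC]
  rw [show (PySem.List.sorted l (fun s => s) false).filter
        (fun s => PySem.Set.contains PROSPERITY_CHANNELS s)
      = prosOf (PySem.List.sorted l (fun s => s) false) from rfl,
    show (PySem.List.sorted l (fun s => s) false).filter
        (fun s => !PySem.Set.contains PROSPERITY_CHANNELS s)
      = ctrlOf (PySem.List.sorted l (fun s => s) false) from rfl,
    hm1, hm2,
    show ((m1Of (PySem.List.sorted l (fun s => s) false)).update
        (m2Of (PySem.List.sorted l (fun s => s) false)).items)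
      = mergedOf (PySem.List.sorted l (fun s => s) false) from rfl,
    foldg_eq]
  -- both sides are now items of buildD dictionaries; compare keys and per-key values
  generalize (PySem.List.sorted l (fun s => s) false) = ss
  have hndA : (buildD (annot ss 0 0) PySem.Dict.empty).keys.Nodup :=
    nodup_keys_buildD _ _ PySem.Dict.nodup_keys_empty
  have hndB : (buildD (ss.map (fun s => (s, (mergedOf ss).getD s ""))) PySem.Dict.empty).keys.Nodup :=
    nodup_keys_buildD _ _ PySem.Dict.nodup_keys_empty
  rw [PySem.Dict.items_eq_map_keys _ hndA "", PySem.Dict.items_eq_map_keys _ hndB "",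
    keys_buildD, keys_buildD, annot_map_fst]
  have hfst : (ss.map (fun s => (s, (mergedOf ss).getD s ""))).map (·.1) = ss := by
    rw [List.map_map]
    exact List.map_id ss
  rw [hfst]
  apply List.map_congr_left
  intro k hkmem
  have hk : k ∈ ss := by
    have : k ∈ PySem.Set.ofList ss := hkmem
    exact (PySem.Set.mem_ofList ss k).mp this
  have hB : (buildD (ss.map (fun s => (s, (mergedOf ss).getD s ""))) PySem.Dict.empty).getD k ""
      = (mergedOf ss).getD k "" := by
    rw [getD_buildD, lastVal?_map_const]
    simp [hk]
  rw [hB, getD_agree ss k hk]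

-- ===== VERDICT (by name: the statement is the Claim_ definition above) =====
theorem get_channel_color_map_spec : Claim_equal_get_channel_color_map := by
  intro slugs _
  show get_channel_color_map slugs = get_channel_color_map_alt slugs
  exact main_eq slugs
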